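-- pv_equiv track=rewrite | github.com/Gururazer/Daily_dsa | DAY-98/Day 98 - Count Number of Trapezoids II.py | count
-- ===== SOURCE A (Python) =====
-- def count(mp):
--     ans = 0
--
--     for inn in mp.values():
--         tot = sum(inn.values())
--         rem = tot
--
--         for val in inn.values():
--             rem -= val
--             ans += val * rem
--
--     return ans
-- ===== SOURCE B (Python) =====
-- def count(mp):
--     def pairsum(vals):
--         tot = 0
--         sumsq = 0
--         for v in vals:
--             tot += v
--             sumsq += v * v
--         return (tot * tot - sumsq) // 2
--
--     return sum(pairsum(inn.values()) for inn in mp.values())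
-- ===== Notes on version B (the rewrite author's own statement) =====
-- stated objective: simpler
-- what changed: Replaces A's running-remainder incremental pairwise accumulation threaded through a nested fold with a per-group helper that gathers (total, sum of squares) in one pass and returns the closed form (tot^2 - sumsq)//2, summed over the groups.
import Mathlib
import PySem

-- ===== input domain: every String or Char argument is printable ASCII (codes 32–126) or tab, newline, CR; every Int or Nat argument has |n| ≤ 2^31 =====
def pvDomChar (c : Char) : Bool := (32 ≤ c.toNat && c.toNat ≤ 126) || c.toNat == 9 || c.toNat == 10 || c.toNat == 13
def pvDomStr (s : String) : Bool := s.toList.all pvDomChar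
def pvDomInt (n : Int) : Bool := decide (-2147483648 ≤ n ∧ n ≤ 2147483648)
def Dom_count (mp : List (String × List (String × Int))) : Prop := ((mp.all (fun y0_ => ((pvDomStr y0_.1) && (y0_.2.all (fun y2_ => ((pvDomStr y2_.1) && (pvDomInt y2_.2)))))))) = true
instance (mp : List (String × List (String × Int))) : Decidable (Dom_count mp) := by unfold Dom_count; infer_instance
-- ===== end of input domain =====

-- B replaces A's nested running-remainder fold with a per-group closed form (tot^2 - sumsq)//2 summed over groups (simpler, same cost).


-- ===== PORT A =====
-- Port of A: outer fold threads ans; per group, tot = sum of values, then the inner loop threads (rem, ans).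
def count (mp : List (String × List (String × Int))) : Int :=
  mp.foldl (fun ans g =>
    let tot : Int := (g.2.map Prod.snd).sum
    (g.2.foldl (fun (p : Int × Int) kv => (p.1 - kv.2, p.2 + kv.2 * (p.1 - kv.2)))
      (tot, ans)).2) 0

-- ===== PORT B =====
-- B's helper loop: one pass over the values accumulating (tot, sumsq).
def pvScan (vals : List Int) (tot sumsq : Int) : Int × Int :=
  match vals with
  | [] => (tot, sumsq)
  | v :: vs => pvScan vs (tot + v) (sumsq + v * v)

-- B's pairsum: closed form (tot*tot - sumsq) // 2 (Python floor division).
def pvPairsum (kvs : List (String × Int)) : Int :=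
  let ts := pvScan (kvs.map Prod.snd) 0 0
  PySem.Int.floordiv (ts.1 * ts.1 - ts.2) 2

-- Port of B: sum of pairsum over the groups (Python's sum over a generator).
def count_alt (mp : List (String × List (String × Int))) : Int :=
  (mp.map (fun g => pvPairsum g.2)).sum

-- ===== PRECONDITION & SPEC =====
def Spec_count (mp : List (String × List (String × Int))) (out : Int) : Prop := out = count_alt mp
instance (mp : List (String × List (String × Int))) (out : Int) : Decidable (Spec_count mp out) := by unfold Spec_count; infer_instance

-- ===== CLAIM (what is proved, stated in full; the proofs are below) =====
def Claim_equal_count : Prop := ∀ (mp : List (String × List (String × Int))), Dom_count mp → Spec_count mp (count mp)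

-- ===== LEMMAS AND PROOFS =====

-- pvScan accumulates the sum and the sum of squares
lemma pvScan_eq (vals : List Int) (t s : Int) :
    pvScan vals t s = (t + vals.sum, s + (vals.map (fun v => v * v)).sum) := by
  induction vals generalizing t s with
  | nil => simp [pvScan]
  | cons v vs ih => simp [pvScan, ih]; constructor <;> ring

-- invariant of A's inner loop: twice the final ans, for any start (r, a)
lemma inner_invariant (vs : List Int) (r a : Int) :
    2 * (vs.foldl (fun (p : Int × Int) v => (p.1 - v, p.2 + v * (p.1 - v))) (r, a)).2
      = 2 * a + 2 * r * vs.sum - vs.sum * vs.sum - (vs.map (fun v => v * v)).sum := by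
  induction vs generalizing r a with
  | nil => simp
  | cons v vs ih =>
    simp only [List.foldl_cons, List.map_cons, List.sum_cons]
    rw [ih]
    ring

-- A's inner loop started at rem = tot adds exactly B's pairsum to ans
lemma group_eq (kvs : List (String × Int)) (ans : Int) :
    (kvs.foldl (fun (p : Int × Int) kv => (p.1 - kv.2, p.2 + kv.2 * (p.1 - kv.2)))
        ((kvs.map Prod.snd).sum, ans)).2
      = ans + pvPairsum kvs := by
  set vs := kvs.map Prod.snd with hvs
  have h := inner_invariant vs vs.sum ans
  set F := (kvs.foldl (fun (p : Int × Int) kv => (p.1 - kv.2, p.2 + kv.2 * (p.1 - kv.2)))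
        (vs.sum, ans)).2 with hF
  have hfold : (vs.foldl (fun (p : Int × Int) v => (p.1 - v, p.2 + v * (p.1 - v)))
      (vs.sum, ans)).2 = F := by
    rw [hF, hvs, List.foldl_map]
  rw [hfold] at h
  have hps : pvPairsum kvs = F - ans := by
    unfold pvPairsum
    rw [← hvs, pvScan_eq]
    have hnum : (0 + vs.sum) * (0 + vs.sum) - (0 + (vs.map (fun v => v * v)).sum)
        = 2 * (F - ans) := by ring_nf at h ⊢; linarith
    simp only [hnum]
    rw [PySem.Int.floordiv_eq_ediv_of_pos (by norm_num)]
    omega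
  rw [hps]; ring

-- the outer fold of an 'ans + f g' step is the sum of f over the list
lemma foldl_eq_sum (mp : List (String × List (String × Int))) (a : Int) :
    mp.foldl (fun ans g =>
      let tot : Int := (g.2.map Prod.snd).sum
      (g.2.foldl (fun (p : Int × Int) kv => (p.1 - kv.2, p.2 + kv.2 * (p.1 - kv.2)))
        (tot, ans)).2) a
      = a + (mp.map (fun g => pvPairsum g.2)).sum := by
  induction mp generalizing a with
  | nil => simp
  | cons g gs ih =>
    simp only [List.foldl_cons, List.map_cons, List.sum_cons]
    rw [ih, group_eq]
    ring

-- ===== VERDICT (by name: the statement is the Claim_ definition above) =====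
theorem count_spec : Claim_equal_count := by
  intro mp _
  unfold Spec_count count count_alt
  rw [foldl_eq_sum]
  ring
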